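-- pv_equiv track=rewrite | github.com/ev001/Problem-Solving | 1074.py | solve
-- ===== SOURCE A (Python) =====
-- def power(k):
--     return 2 ** k
--
-- def solve(n, x, y):
--     if n == 1:
--         return 2 * x + y
--     else:
--         if x < power(n - 1):
--             if y < power(n - 1):
--                 return solve(n - 1, x, y)
--             else:
--                 return solve(n - 1, x, y - power(n - 1)) + power(2 * n - 2)
--         else:
--             if y < power(n - 1):
--                 return solve(n - 1, x - power(n - 1), y) + power(2 * n - 2) * 2
--             else:
--                 return solve(n - 1, x - power(n - 1), y - power(n - 1)) + power(2 * n - 2) * 3;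
-- ===== SOURCE B (Python) =====
-- def solve(n, x, y):
--     res = 0
--     for level in range(n - 1, 0, -1):
--         p = 2 ** level
--         xb = 1 if x >= p else 0
--         yb = 1 if y >= p else 0
--         x -= xb * p
--         y -= yb * p
--         res += (2 * xb + yb) * p * p
--     return res + 2 * x + y
-- ===== Notes on version B (the rewrite author's own statement) =====
-- stated objective: alternative
-- what changed: Replaces A's four-way recursive quadrant descent with a single explicit loop over the levels that keeps an additive accumulator and performs the same per-level compare-and-subtract on x and y.
-- outside the precondition, e.g. on solve(0, 1, 1): A raises RecursionError, B returns 3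
import Mathlib
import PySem

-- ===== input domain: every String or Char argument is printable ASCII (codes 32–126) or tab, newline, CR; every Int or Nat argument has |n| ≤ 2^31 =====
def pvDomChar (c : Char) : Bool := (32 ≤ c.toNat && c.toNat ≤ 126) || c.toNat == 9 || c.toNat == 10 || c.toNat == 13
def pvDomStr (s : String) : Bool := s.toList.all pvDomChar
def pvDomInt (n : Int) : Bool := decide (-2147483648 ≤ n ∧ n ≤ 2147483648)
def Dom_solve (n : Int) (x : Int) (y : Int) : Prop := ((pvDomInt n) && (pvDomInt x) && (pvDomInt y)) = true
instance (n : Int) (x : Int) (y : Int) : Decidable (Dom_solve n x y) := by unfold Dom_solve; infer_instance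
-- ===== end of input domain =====

-- B replaces A's four-way recursive descent by a single explicit loop over the levels
-- with an additive accumulator (objective: alternative decomposition, same cost).

-- ===== PORT A =====
def power (k : Int) : Int := 2 ^ k.toNat

-- Python's 'if n == 1' base case; for n ≤ 0 the Python recursion never terminates
-- (excluded by Pre_solve), so the port bottoms out at n ≤ 1.
def solve (n : Int) (x : Int) (y : Int) : Int :=
  if _h : n ≤ 1 then 2 * x + y
  else
    if x < power (n - 1) then
      if y < power (n - 1) then solve (n - 1) x y
      else solve (n - 1) x (y - power (n - 1)) + power (2 * n - 2)
    else
      if y < power (n - 1) then solve (n - 1) (x - power (n - 1)) y + power (2 * n - 2) * 2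
      else solve (n - 1) (x - power (n - 1)) (y - power (n - 1)) + power (2 * n - 2) * 3
termination_by n.toNat
decreasing_by all_goals omega

-- ===== PORT B =====
-- one loop iteration: state (x, y, res)
def stepB (st : Int × Int × Int) (level : Int) : Int × Int × Int :=
  let p : Int := 2 ^ level.toNat
  let xb : Int := if st.1 ≥ p then 1 else 0
  let yb : Int := if st.2.1 ≥ p then 1 else 0
  (st.1 - xb * p, st.2.1 - yb * p, st.2.2 + (2 * xb + yb) * p * p)

def solve_alt (n : Int) (x : Int) (y : Int) : Int :=
  let s := (PySem.List.pyRange (n - 1) 0 (-1)).foldl stepB (x, y, 0)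
  s.2.2 + 2 * s.1 + s.2.1

-- ===== PRECONDITION & SPEC =====
-- Pre_ excludes n ≤ 0, where Python's A recurses forever (never returns).
def Pre_solve (n : Int) (_x : Int) (_y : Int) : Prop := 1 ≤ n
instance (n : Int) (x : Int) (y : Int) : Decidable (Pre_solve n x y) := by unfold Pre_solve; infer_instance
def pvWitness_solve : Int × Int × Int := (3, 5, 2)

def Spec_solve (n : Int) (x : Int) (y : Int) (out : Int) : Prop := out = solve_alt n x y
instance (n : Int) (x : Int) (y : Int) (out : Int) : Decidable (Spec_solve n x y out) := by unfold Spec_solve; infer_instance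

-- ===== CLAIM (what is proved, stated in full; the proofs are below) =====
def Claim_equal_solve : Prop := ∀ (n : Int) (x : Int) (y : Int), Dom_solve n x y → Pre_solve n x y → Spec_solve n x y (solve n x y)

-- ===== LEMMAS AND PROOFS =====

-- the accumulator of the loop is purely additive
theorem stepB_shift (x y r l : Int) :
    stepB (x, y, r) l =
      ((stepB (x, y, 0) l).1, (stepB (x, y, 0) l).2.1, r + (stepB (x, y, 0) l).2.2) := by
  simp only [stepB]
  ring_nf

theorem stepB_foldl_shift (L : List Int) : ∀ (x y r : Int),
    L.foldl stepB (x, y, r) =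
      ((L.foldl stepB (x, y, 0)).1, (L.foldl stepB (x, y, 0)).2.1,
        r + (L.foldl stepB (x, y, 0)).2.2) := by
  induction L with
  | nil => intro x y r; simp
  | cons l L ih =>
    intro x y r
    simp only [List.foldl_cons]
    rw [stepB_shift, ih, ih ((stepB (x, y, 0) l).1) ((stepB (x, y, 0) l).2.1) ((stepB (x, y, 0) l).2.2)]
    simp [add_assoc]

theorem solve_eq_alt : ∀ (m : Nat) (n x y : Int), n.toNat = m → 1 ≤ n →
    solve n x y = solve_alt n x y := by
  intro m
  induction m with
  | zero => intro n x y hm hn; omega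
  | succ k ih =>
    intro n x y hm hn
    by_cases h1 : n ≤ 1
    · have : n = 1 := by omega
      subst this
      rw [solve]
      simp [solve_alt]
    · -- n ≥ 2
      have hcons : PySem.List.pyRange (n - 1) 0 (-1) =
          (n - 1) :: PySem.List.pyRange (n - 1 - 1) 0 (-1) := by
        rw [PySem.List.pyRange_neg_one_cons (by omega : (0:Int) < n - 1)]
      have hrec : ∀ x' y', solve (n - 1) x' y' = solve_alt (n - 1) x' y' := by
        intro x' y'; exact ih (n - 1) x' y' (by omega) (by omega)
      have hp : power (2 * n - 2) = power (n - 1) * power (n - 1) := by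
        unfold power
        rw [← pow_add]
        congr 1
        omega
      have expand : ∀ a b : Int,
          solve_alt n a b =
            (stepB (a, b, 0) (n - 1)).2.2 +
              solve_alt (n - 1) (stepB (a, b, 0) (n - 1)).1 (stepB (a, b, 0) (n - 1)).2.1 := by
        intro a b
        unfold solve_alt
        rw [hcons]
        simp only [List.foldl_cons]
        rcases hst : stepB (a, b, 0) (n - 1) with ⟨a', b', r'⟩
        rw [stepB_foldl_shift]
        ring
      have hpw : (2:Int) ^ (n - 1).toNat = power (n - 1) := rfl
      -- evaluate the first loop step in each of the four quadrants
      have hs1 : ∀ a b : Int, a < power (n - 1) → b < power (n - 1) →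
          stepB (a, b, 0) (n - 1) = (a, b, 0) := by
        intro a b ha hb
        simp only [stepB, ge_iff_le, hpw]
        rw [if_neg (not_le.mpr ha), if_neg (not_le.mpr hb)]
        norm_num
      have hs2 : ∀ a b : Int, a < power (n - 1) → power (n - 1) ≤ b →
          stepB (a, b, 0) (n - 1) = (a, b - power (n - 1), power (n - 1) * power (n - 1)) := by
        intro a b ha hb
        simp only [stepB, ge_iff_le, hpw]
        rw [if_neg (not_le.mpr ha), if_pos hb]
        norm_num
      have hs3 : ∀ a b : Int, power (n - 1) ≤ a → b < power (n - 1) →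
          stepB (a, b, 0) (n - 1) = (a - power (n - 1), b, 2 * (power (n - 1) * power (n - 1))) := by
        intro a b ha hb
        simp only [stepB, ge_iff_le, hpw]
        rw [if_pos ha, if_neg (not_le.mpr hb)]
        norm_num
        ring
      have hs4 : ∀ a b : Int, power (n - 1) ≤ a → power (n - 1) ≤ b →
          stepB (a, b, 0) (n - 1) =
            (a - power (n - 1), b - power (n - 1), 3 * (power (n - 1) * power (n - 1))) := by
        intro a b ha hb
        simp only [stepB, ge_iff_le, hpw]
        rw [if_pos ha, if_pos hb]
        norm_num
        ring
      rw [solve]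
      simp only [dif_neg h1]
      split_ifs with hx hy hy
      · rw [hrec, expand x y, hs1 x y hx hy]
        norm_num
      · rw [hrec, expand x y, hs2 x y hx (le_of_not_gt hy), hp]
        norm_num
        ring
      · rw [hrec, expand x y, hs3 x y (le_of_not_gt hx) hy, hp]
        norm_num
        ring
      · rw [hrec, expand x y, hs4 x y (le_of_not_gt hx) (le_of_not_gt hy), hp]
        norm_num
        ring

-- ===== VERDICT (by name: the statement is the Claim_ definition above) =====
theorem solve_spec : Claim_equal_solve := by
  intro n x y _ hpre
  unfold Spec_solve
  exact solve_eq_alt n.toNat n x y rfl hpre
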